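-- pv_equiv track=rewrite | github.com/wozwiiiii/Leetcode_Note_base | 字符串/Boyer_Moore.py | generateSuffixArray
-- ===== SOURCE A (Python) =====
-- def generateSuffixArray(p: str):
--     """
--     生成后缀数组 suffix。
--     suffix[i] 表示以 i 结尾的子串与模式串后缀的最大匹配长度。
--     """
--     m = len(p)
--     suffix = [m for _ in range(m)]  # 初始化为 0，表示尚未匹配
--     suffix[m - 1] = m  # 最后一个字符的后缀长度为 m
--     for i in range(m - 2, -1, -1):
--         j = i
--         # 从 i 向前与模式串后缀比较
--         while j >= 0 and p[j] == p[m - 1 - i + j]: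
--             j -= 1
--         suffix[i] = i - j
--     return suffix
-- ===== SOURCE B (Python) =====
-- def generateSuffixArray(p: str):
--     """Good-suffix match lengths via the Z-algorithm on the reversed
--     pattern: O(m) instead of A's O(m^2) per-position rescan."""
--     m = len(p)
--     if m == 0:
--         return []
--     r = p[::-1]
--     z = [0] * m
--     z[0] = m
--     l = 0
--     rt = 0
--     for i in range(1, m):
--         k = min(z[i - l], rt - i) if i < rt else 0
--         while i + k < m and r[k] == r[i + k]:
--             k += 1
--         z[i] = k
--         if i + k > rt:
--             l = i
--             rt = i + k
--     return [z[m - 1 - i] for i in range(m)]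
-- ===== Notes on version B (the rewrite author's own statement) =====
-- stated objective: faster
-- what changed: Replaces A's per-position backward rescan (O(m^2)) by the linear-time Z-algorithm on the reversed pattern, reading each suffix length off the Z-array.
import Mathlib
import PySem

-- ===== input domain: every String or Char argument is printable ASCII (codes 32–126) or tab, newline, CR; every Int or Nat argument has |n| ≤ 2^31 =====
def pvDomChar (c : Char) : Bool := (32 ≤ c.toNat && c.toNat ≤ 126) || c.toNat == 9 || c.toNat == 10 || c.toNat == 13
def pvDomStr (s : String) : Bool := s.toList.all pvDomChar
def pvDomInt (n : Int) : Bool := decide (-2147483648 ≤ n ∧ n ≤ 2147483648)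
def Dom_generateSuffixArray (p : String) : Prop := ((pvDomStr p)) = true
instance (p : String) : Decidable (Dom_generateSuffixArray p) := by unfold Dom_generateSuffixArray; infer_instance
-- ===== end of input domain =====

-- B replaces A's quadratic per-position backward rescan by the linear-time
-- Z-algorithm on the reversed pattern (objective: faster, asymptotic).

-- ===== PORT A =====
-- the inner 'while j >= 0 and p[j] == p[m - 1 - i + j]: j -= 1' loop; returns the final j
def pvWhileA (pl : List Char) (m i j : Int) : Int :=
  if 0 ≤ j ∧ PySem.List.pyGet? pl j = PySem.List.pyGet? pl (m - 1 - i + j) then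
    pvWhileA pl m i (j - 1)
  else j
termination_by (j + 1).toNat
decreasing_by omega

def generateSuffixArray (p : String) : List Int :=
  let pl := p.toList
  let m : Int := pl.length
  let suffix := List.replicate pl.length m
  let suffix := suffix.set (pl.length - 1) m
  (PySem.List.pyRange (m - 2) (-1) (-1)).foldl
    (fun s i => s.set i.toNat (i - pvWhileA pl m i i)) suffix

-- ===== PORT B =====
-- the inner extension loop 'while i + k < m and r[k] == r[i + k]: k += 1'
def pvExt (r : List Char) (i k : Nat) : Nat :=
  if i + k < r.length ∧ r[k]? = r[i + k]? then pvExt r i (k + 1) else k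
termination_by r.length - (i + k)
decreasing_by omega

-- one iteration of the Z-algorithm loop; state = (z, l, rt)
def pvStepB (r : List Char) (st : List Nat × Nat × Nat) (i : Nat) : List Nat × Nat × Nat :=
  let z := st.1
  let l := st.2.1
  let rt := st.2.2
  let k0 := if i < rt then min (z.getD (i - l) 0) (rt - i) else 0
  let k := pvExt r i k0
  let z' := z.set i k
  if rt < i + k then (z', i, i + k) else (z', l, rt)

def generateSuffixArray_alt (p : String) : List Int :=
  let r := p.toList.reverse
  let m := r.length
  if m = 0 then [] else
    let z0 := (List.replicate m 0).set 0 m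
    let st := (List.range' 1 (m - 1)).foldl (pvStepB r) (z0, 0, 0)
    (List.range m).map (fun i => (st.1.getD (m - 1 - i) 0 : Int))

-- ===== PRECONDITION & SPEC =====
-- Pre_ excludes only the empty string, on which Python A raises IndexError.
def Pre_generateSuffixArray (p : String) : Prop := p ≠ ""
instance (p : String) : Decidable (Pre_generateSuffixArray p) := by
  unfold Pre_generateSuffixArray; infer_instance
def pvWitness_generateSuffixArray : String := "aba"

def Spec_generateSuffixArray (p : String) (out : List Int) : Prop := out = generateSuffixArray_alt p
instance (p : String) (out : List Int) : Decidable (Spec_generateSuffixArray p out) := by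
  unfold Spec_generateSuffixArray; infer_instance

-- ===== CLAIM (what is proved, stated in full; the proofs are below) =====
def Claim_equal_generateSuffixArray : Prop := ∀ (p : String), Dom_generateSuffixArray p → Pre_generateSuffixArray p → Spec_generateSuffixArray p (generateSuffixArray p)
-- ===== LEMMAS AND PROOFS =====

-- longest common prefix length of two character lists
def pvLcp : List Char → List Char → Nat
  | a :: as, b :: bs => if a = b then pvLcp as bs + 1 else 0
  | _, _ => 0

-- zN r t = length of the longest common prefix of r.drop t and r
def pvZ (r : List Char) (t : Nat) : Nat := pvLcp (r.drop t) r

lemma pvLcp_comm (as bs : List Char) : pvLcp as bs = pvLcp bs as := by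
  induction as generalizing bs with
  | nil => cases bs <;> rfl
  | cons a as ih =>
    cases bs with
    | nil => rfl
    | cons b bs =>
      simp only [pvLcp]
      by_cases h : a = b
      · subst h; simp [ih]
      · simp [h, Ne.symm h]
lemma pvLcp_self (as : List Char) : pvLcp as as = as.length := by
  induction as with
  | nil => rfl
  | cons a as ih => simp [pvLcp, ih]

lemma pvLcp_le_left (as bs : List Char) : pvLcp as bs ≤ as.length := by
  induction as generalizing bs with
  | nil => cases bs <;> simp [pvLcp]
  | cons a as ih =>
    cases bs with
    | nil => simp [pvLcp]
    | cons b bs =>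
      simp only [pvLcp]
      split
      · simpa using ih bs
      · simp

lemma pvLcp_getElem? {as bs : List Char} {t : Nat} (h : t < pvLcp as bs) :
    as[t]? = bs[t]? := by
  induction as generalizing bs t with
  | nil => simp [pvLcp] at h
  | cons a as ih =>
    cases bs with
    | nil => simp [pvLcp] at h
    | cons b bs =>
      simp only [pvLcp] at h
      by_cases hab : a = b
      · simp only [hab, if_true] at h
        cases t with
        | zero => simp [hab]
        | succ t => simpa using ih (by omega)
      · simp [hab] at h

lemma le_pvLcp {as bs : List Char} {k : Nat} (h1 : k ≤ as.length) (h2 : k ≤ bs.length)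
    (h : ∀ t < k, as[t]? = bs[t]?) : k ≤ pvLcp as bs := by
  induction as generalizing bs k with
  | nil => simp at h1; omega
  | cons a as ih =>
    cases bs with
    | nil => simp at h2; omega
    | cons b bs =>
      cases k with
      | zero => omega
      | succ k =>
        have h0 := h 0 (by omega)
        simp at h0
        simp only [pvLcp, h0, if_true]
        have := ih (k := k) (bs := bs) (by simpa using h1) (by simpa using h2)
          (fun t ht => by simpa using h (t+1) (by omega))
        omega

lemma pvLcp_add_drop (as bs : List Char) (k : Nat) (h : k ≤ pvLcp as bs) :
    pvLcp as bs = k + pvLcp (as.drop k) (bs.drop k) := by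
  induction k generalizing as bs with
  | zero => simp
  | succ k ih =>
    cases as with
    | nil => simp [pvLcp] at h
    | cons a as =>
      cases bs with
      | nil => simp [pvLcp] at h
      | cons b bs =>
        simp only [pvLcp] at h ⊢
        by_cases hab : a = b
        · simp only [hab, if_true] at h ⊢
          have := ih as bs (by omega)
          simp only [List.drop_succ_cons]
          omega
        · simp [hab] at h

lemma pvExt_eq (r : List Char) (i k : Nat) :
    pvExt r i k = k + pvLcp (r.drop k) (r.drop (i + k)) := by
  by_cases hik : i + k < r.length
  · have hk : k < r.length := by omega
    by_cases heq : r[k] = r[i + k]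
    · have hcond : i + k < r.length ∧ r[k]? = r[i + k]? := by
        refine ⟨hik, ?_⟩
        rw [List.getElem?_eq_getElem hk, List.getElem?_eq_getElem hik, heq]
      rw [pvExt, if_pos hcond, pvExt_eq r i (k + 1)]
      rw [List.drop_eq_getElem_cons hk, List.drop_eq_getElem_cons hik]
      simp only [pvLcp, if_pos heq]
      rw [show i + (k + 1) = i + k + 1 by omega]
      omega
    · have hcond : ¬ (i + k < r.length ∧ r[k]? = r[i + k]?) := by
        rintro ⟨_, h2⟩
        rw [List.getElem?_eq_getElem hk, List.getElem?_eq_getElem hik] at h2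
        exact heq (by simpa using h2)
      rw [pvExt, if_neg hcond]
      rw [List.drop_eq_getElem_cons hk, List.drop_eq_getElem_cons hik]
      simp [pvLcp, heq]
  · rw [pvExt, if_neg (by rintro ⟨h1, _⟩; omega)]
    rw [List.drop_eq_nil_of_le (show r.length ≤ i + k by omega)]
    cases r.drop k <;> simp [pvLcp]
termination_by r.length - (i + k)
decreasing_by omega

lemma pvExt_z (r : List Char) (i k : Nat) (hk : k ≤ pvZ r i) :
    pvExt r i k = pvZ r i := by
  rw [pvExt_eq, pvLcp_comm]
  have h := pvLcp_add_drop (r.drop i) r k hk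
  rw [List.drop_drop] at h
  unfold pvZ at *
  omega

lemma pv_box {r : List Char} {l i rt : Nat} (hbox : rt ≤ l + pvZ r l) (hil : l < i)
    (hirt : i < rt) : min (pvZ r (i - l)) (rt - i) ≤ pvZ r i := by
  set k0 := min (pvZ r (i - l)) (rt - i) with hk0
  have hzl : pvZ r l ≤ r.length - l := by
    have := pvLcp_le_left (r.drop l) r; simpa [pvZ] using this
  have hrtm : rt ≤ r.length := by omega
  apply le_pvLcp
  · simp; omega
  · have : k0 ≤ rt - i := min_le_right _ _
    omega
  · intro t ht
    have h1 : (r.drop i)[t]? = r[i + t]? := List.getElem?_drop ..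
    have hbig : (i - l) + t < pvZ r l := by
      have : k0 ≤ rt - i := min_le_right _ _
      omega
    have h2 : (r.drop l)[(i - l) + t]? = r[(i - l) + t]? := pvLcp_getElem? hbig
    rw [List.getElem?_drop] at h2
    rw [show l + ((i - l) + t) = i + t by omega] at h2
    have hsm : t < pvZ r (i - l) := by
      have : k0 ≤ pvZ r (i - l) := min_le_left _ _
      omega
    have h3 : (r.drop (i - l))[t]? = r[t]? := pvLcp_getElem? hsm
    rw [List.getElem?_drop] at h3
    rw [h1, h2, ← h3]

def pvInv (r : List Char) (i : Nat) (st : List Nat × Nat × Nat) : Prop :=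
  st.1.length = r.length ∧ (∀ t < i, st.1.getD t 0 = pvZ r t) ∧ st.2.1 < i ∧
    st.2.2 ≤ st.2.1 + pvZ r st.2.1 ∧ (st.2.1 = 0 → st.2.2 = 0)

lemma pvStepB_inv {r : List Char} {i : Nat} {st : List Nat × Nat × Nat}
    (hi : i < r.length) (h : pvInv r i st) : pvInv r (i + 1) (pvStepB r st i) := by
  obtain ⟨hlen, hz, hl, hbox, hl0⟩ := h
  obtain ⟨z, l, rt⟩ := st
  simp only at hlen hz hl hbox hl0
  have hk0 : (if i < rt then min (z.getD (i - l) 0) (rt - i) else 0) ≤ pvZ r i := by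
    split
    · rename_i hirt
      have hlpos : 0 < l := by
        by_contra hc
        have h0 : l = 0 := by omega
        have := hl0 h0
        omega
      have hil : i - l < i := by omega
      rw [hz (i - l) hil]
      exact pv_box hbox hl hirt
    · exact Nat.zero_le _
  have hkz : pvExt r i (if i < rt then min (z.getD (i - l) 0) (rt - i) else 0) = pvZ r i :=
    pvExt_z r i _ hk0
  unfold pvStepB
  simp only [hkz]
  have hzset : ∀ t < i + 1, (z.set i (pvZ r i)).getD t 0 = pvZ r t := by
    intro t ht
    by_cases hti : t = i
    · subst hti
      rw [List.getD_eq_getElem?_getD, List.getElem?_set_self (by omega)]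
      simp
    · rw [List.getD_eq_getElem?_getD, List.getElem?_set_ne (by omega)]
      rw [← List.getD_eq_getElem?_getD]
      exact hz t (by omega)
  split
  · exact ⟨by simpa using hlen, hzset, by simp, by simp, by simp; omega⟩
  · exact ⟨by simpa using hlen, hzset, by simp; omega, by simpa using hbox,
      by simpa using hl0⟩

lemma pv_fold_inv (r : List Char) : ∀ (n a : Nat) (st : List Nat × Nat × Nat),
    a + n ≤ r.length → pvInv r a st →
    pvInv r (a + n) ((List.range' a n).foldl (pvStepB r) st) := by
  intro n
  induction n with
  | zero => intro a st _ h; simpa using h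
  | succ n ih =>
    intro a st hle h
    rw [List.range'_succ, List.foldl_cons]
    have := ih (a + 1) (pvStepB r st a) (by omega) (pvStepB_inv (by omega) h)
    rw [show a + (n + 1) = a + 1 + n by omega]
    exact this

lemma alt_eq_target (p : String) (hp : p ≠ "") :
    generateSuffixArray_alt p
      = (List.range p.toList.length).map
          (fun i => ((pvZ p.toList.reverse (p.toList.length - 1 - i) : Nat) : Int)) := by
  have hm : 0 < p.toList.length := by
    cases hq : p.toList with
    | nil => exact absurd (String.ext (by simpa using hq)) hp
    | cons a as => simp
  have hrl : p.toList.reverse.length = p.toList.length := by simp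
  unfold generateSuffixArray_alt
  rw [if_neg (by omega)]
  rw [hrl]
  show (List.range p.toList.length).map
      (fun i => ((((List.range' 1 (p.toList.length - 1)).foldl (pvStepB p.toList.reverse)
        ((List.replicate p.toList.length 0).set 0 p.toList.length, 0, 0)).1.getD
          (p.toList.length - 1 - i) 0 : Nat) : Int)) = _
  have hinit : pvInv p.toList.reverse 1
      ((List.replicate p.toList.length 0).set 0 p.toList.length, 0, 0) := by
    refine ⟨by simp [hrl], ?_, by simp, by simp, by simp⟩
    intro t ht
    have ht0 : t = 0 := by omega
    subst ht0
    rw [List.getD_eq_getElem?_getD, List.getElem?_set_self (by simpa using hm)]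
    simp [pvZ, pvLcp_self, hrl]
  have hfold := pv_fold_inv p.toList.reverse (p.toList.length - 1) 1 _
    (by rw [hrl]; omega) hinit
  rw [show 1 + (p.toList.length - 1) = p.toList.length by omega] at hfold
  obtain ⟨hlen, hz, -, -, -⟩ := hfold
  apply List.map_congr_left
  intro i hi
  rw [List.mem_range] at hi
  rw [hz (p.toList.length - 1 - i) (by omega)]

-- A-side lemmas
lemma pv_rev_take_succ (pl : List Char) (n : Nat) (h : n < pl.length) :
    (pl.take (n + 1)).reverse = pl[n] :: (pl.take n).reverse := by
  rw [List.take_add_one, List.getElem?_eq_getElem h]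
  simp

lemma pvWhileA_eq (pl : List Char) (i : Nat) (hi : i + 1 < pl.length) :
    ∀ j : Nat, j ≤ i →
      pvWhileA pl pl.length i j
        = (j : Int) - (pvLcp ((pl.take (j + 1)).reverse)
            ((pl.take (pl.length - 1 - i + j + 1)).reverse) : Nat) := by
  intro j
  induction j with
  | zero =>
    intro _
    have hj0 : (0 : Nat) < pl.length := by omega
    have hidx : pl.length - 1 - i < pl.length := by omega
    rw [pvWhileA]
    rw [pv_rev_take_succ pl 0 hj0, pv_rev_take_succ pl (pl.length - 1 - i) hidx]
    have hcast : (pl.length : Int) - 1 - (i : Nat) + ((0 : Nat) : Int) = ((pl.length - 1 - i : Nat) : Int) := by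
      push_cast; omega
    rw [hcast, PySem.List.pyGet?_natCast, PySem.List.pyGet?_natCast,
      List.getElem?_eq_getElem hj0, List.getElem?_eq_getElem hidx]
    by_cases heq : pl[(0 : Nat)] = pl[pl.length - 1 - i]
    · rw [if_pos ⟨le_refl 0, by rw [heq]⟩, pvWhileA, if_neg (by rintro ⟨hc, -⟩; omega)]
      simp [pvLcp, heq]
    · rw [if_neg (by rintro ⟨-, hc⟩; exact heq (by simpa using hc))]
      simp [pvLcp, heq]
  | succ j ih =>
    intro hji
    have hj1 : j + 1 < pl.length := by omega
    have hidx : pl.length - 1 - i + j + 1 < pl.length := by omega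
    rw [pvWhileA]
    have hcast : (pl.length : Int) - 1 - i + (j + 1 : Nat) = ((pl.length - 1 - i + j + 1 : Nat) : Int) := by
      push_cast; omega
    rw [hcast, PySem.List.pyGet?_natCast, PySem.List.pyGet?_natCast,
      List.getElem?_eq_getElem hj1, List.getElem?_eq_getElem hidx]
    rw [show pl.length - 1 - i + (j + 1) + 1 = pl.length - 1 - i + j + 1 + 1 from by omega]
    rw [pv_rev_take_succ pl (j + 1) hj1, pv_rev_take_succ pl (pl.length - 1 - i + j + 1) hidx]
    by_cases heq : pl[j + 1] = pl[pl.length - 1 - i + j + 1]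
    · rw [if_pos ⟨by omega, by rw [heq]⟩]
      have hstep : ((j + 1 : Nat) : Int) - 1 = ((j : Nat) : Int) := by push_cast; omega
      rw [hstep, ih (by omega)]
      simp only [pvLcp, if_pos heq]
      push_cast
      omega
    · rw [if_neg (by rintro ⟨-, hc⟩; exact heq (by simpa using hc))]
      simp [pvLcp, heq]

lemma pv_pyRange_down (m : Nat) (h : 1 ≤ m) :
    PySem.List.pyRange ((m : Int) - 2) (-1) (-1)
      = (List.range (m - 1)).map (fun k => (m : Int) - 2 - (k : Nat)) := by
  unfold PySem.List.pyRange
  rw [if_neg (by omega)]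
  by_cases h2 : (2 : Nat) ≤ m
  · rw [if_neg (by omega), if_pos (by omega)]
    rw [show ((m : Int) - 2 - -1 + - -1 - 1) / - -1 = (m : Int) - 1 from by rw [neg_neg, Int.ediv_one]; ring]
    rw [show ((m : Int) - 1).toNat = m - 1 from by omega]
    show (List.range (m - 1)).map (fun k => (m : Int) - 2 + -1 * (k : Nat)) = _
    apply List.map_congr_left
    intro k _
    ring
  · have hm1 : m = 1 := by omega
    subst hm1
    norm_num

lemma pv_foldl_set (f : Int → Int) : ∀ (idxs : List Int) (init : List Int) (t : Nat) (d : Int),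
    (∀ i ∈ idxs, 0 ≤ i) →
    (idxs.foldl (fun s i => s.set i.toNat (f i)) init).getD t d
      = if (t : Int) ∈ idxs ∧ t < init.length then f t else init.getD t d := by
  intro idxs
  induction idxs with
  | nil => intro init t d _; simp
  | cons a rest ih =>
    intro init t d hpos
    rw [List.foldl_cons]
    rw [ih (init.set a.toNat (f a)) t d (fun i hi => hpos i (List.mem_cons_of_mem a hi))]
    have hlen : (init.set a.toNat (f a)).length = init.length := by simp
    by_cases hmem : (t : Int) ∈ rest ∧ t < init.length
    · rw [if_pos (by rw [hlen]; exact hmem), if_pos ⟨List.mem_cons_of_mem a hmem.1, hmem.2⟩]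
    · rw [if_neg (by rw [hlen]; exact hmem)]
      have ha0 : 0 ≤ a := hpos a (List.mem_cons_self ..)
      by_cases hta : (t : Int) = a
      · have hat : a.toNat = t := by omega
        by_cases htl : t < init.length
        · rw [List.getD_eq_getElem?_getD, hat, List.getElem?_set_self htl]
          rw [if_pos ⟨by rw [hta]; exact List.mem_cons_self .., htl⟩]
          simp [hta]
        · rw [if_neg (by rintro ⟨-, hc⟩; omega)]
          rw [List.getD_eq_getElem?_getD, List.getD_eq_getElem?_getD,
            List.getElem?_eq_none (by rw [List.length_set]; omega),
            List.getElem?_eq_none (by omega)]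
      · rw [List.getD_eq_getElem?_getD, List.getElem?_set_ne (by omega),
          ← List.getD_eq_getElem?_getD]
        rw [if_neg (by rintro ⟨hc, hlt⟩; rcases List.mem_cons.mp hc with h | h; exact hta h; exact hmem ⟨h, hlt⟩)]

lemma pv_foldl_set_length (f : Int → Int) : ∀ (idxs : List Int) (init : List Int),
    (idxs.foldl (fun s i => s.set i.toNat (f i)) init).length = init.length := by
  intro idxs
  induction idxs with
  | nil => intro init; rfl
  | cons a rest ih => intro init; rw [List.foldl_cons, ih]; simp

lemma a_eq_target (p : String) (hp : p ≠ "") :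
    generateSuffixArray p
      = (List.range p.toList.length).map
          (fun i => ((pvZ p.toList.reverse (p.toList.length - 1 - i) : Nat) : Int)) := by
  have hm : 0 < p.toList.length := by
    cases hq : p.toList with
    | nil => exact absurd (String.ext (by simpa using hq)) hp
    | cons a as => simp
  unfold generateSuffixArray
  show ((PySem.List.pyRange ((p.toList.length : Int) - 2) (-1) (-1)).foldl
      (fun s i => s.set i.toNat (i - pvWhileA p.toList (p.toList.length : Int) i i))
      ((List.replicate p.toList.length ((p.toList.length : Nat) : Int)).set
        (p.toList.length - 1) ((p.toList.length : Nat) : Int))) = _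
  rw [pv_pyRange_down p.toList.length hm]
  set pl := p.toList with hpl
  set L := pl.length with hL
  set init := (List.replicate L ((L : Nat) : Int)).set (L - 1) ((L : Nat) : Int) with hinit
  have hinitlen : init.length = L := by simp [hinit]
  set f : Int → Int := fun i => i - pvWhileA pl L i i with hf
  have hfold : ∀ t : Nat, t < L →
      ((((List.range (L - 1)).map (fun k => (L : Int) - 2 - (k : Nat))).foldl
        (fun s i => s.set i.toNat (f i)) init).getD t 0)
        = ((pvZ pl.reverse (L - 1 - t) : Nat) : Int) := by
    intro t ht
    rw [pv_foldl_set f _ init t 0 ?pos]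
    case pos =>
      intro i hi
      rw [List.mem_map] at hi
      obtain ⟨k, hk, rfl⟩ := hi
      rw [List.mem_range] at hk
      omega
    by_cases htL : t < L - 1
    · have hmem0 : (t : Int) ∈ (List.range (L - 1)).map (fun k => (L : Int) - 2 - (k : Nat)) := by
        rw [List.mem_map]
        exact ⟨L - 2 - t, by rw [List.mem_range]; omega, by omega⟩
      rw [if_pos ⟨hmem0, by omega⟩]
      rw [hf]
      show (t : Int) - pvWhileA pl L t t = _
      rw [show ((L : Nat) : Int) = ((pl.length : Nat) : Int) from by rw [hL]]
      rw [pvWhileA_eq pl t (by omega) t (le_refl t)]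
      rw [show pl.length - 1 - t + t + 1 = pl.length from by omega]
      rw [List.take_length]
      unfold pvZ
      rw [show pl.length - 1 - t = pl.length - (t + 1) from by omega, ← List.reverse_take]
      ring
    · have htt : t = L - 1 := by omega
      subst htt
      rw [if_neg (by
        rintro ⟨hmem, -⟩
        rw [List.mem_map] at hmem
        obtain ⟨k, hk, hke⟩ := hmem
        rw [List.mem_range] at hk
        omega)]
      rw [hinit, List.getD_eq_getElem?_getD, List.getElem?_set_self (by simp; omega)]
      unfold pvZ
      rw [show L - 1 - (L - 1) = 0 from by omega, List.drop_zero, pvLcp_self]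
      simp [hL]
  apply List.ext_getElem
  · rw [pv_foldl_set_length]
    simp [hinitlen]
  · intro t h1 h2
    have hlt : t < L := by
      rw [pv_foldl_set_length, hinitlen] at h1
      exact h1
    rw [← List.getD_eq_getElem _ 0 h1, hfold t hlt]
    simp

-- ===== VERDICT (by name: the statement is the Claim_ definition above) =====
theorem generateSuffixArray_spec : Claim_equal_generateSuffixArray := by
  intro p _ hp
  unfold Spec_generateSuffixArray
  rw [a_eq_target p hp, alt_eq_target p hp]
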